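-- pv_equiv track=rewrite | github.com/riCoYanG-byte/leetcode | strings/No908.py | canStrechy
-- ===== SOURCE A (Python) =====
-- def getKeyTable(str):
--     table = []
--     for ele in str:
--         if not table:
--             table.append([ele, 1])
--         else:
--             if ele == table[-1][0]:
--                 table[-1][1] += 1
--             else:
--                 table.append([ele, 1])
--     return table
--
-- def canStrechy(S, word):
--     counter_S = getKeyTable(S)
--     counter_word = getKeyTable(word)
--     for i in range(len(S)):
--         if len(counter_S) != len(counter_word):
--             break
--         if counter_S[i][0] != counter_word[i][0]:
--             break
--         if counter_S[i][1] < 3 and counter_S[i][1] != counter_word[i][1]: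
--             break
--         if i == len(counter_S) - 1:
--             return True
--     return False
-- ===== SOURCE B (Python) =====
-- def canStrechy(S, word):
--     if not S:
--         return False
--     i = j = 0
--     n, m = len(S), len(word)
--     while i < n and j < m:
--         c = S[i]
--         if word[j] != c:
--             return False
--         ci = 0
--         while i < n and S[i] == c:
--             i += 1
--             ci += 1
--         cj = 0
--         while j < m and word[j] == c:
--             j += 1
--             cj += 1
--         if ci < 3 and ci != cj:
--             return False
--     return i == n and j == m
-- ===== Notes on version B (the rewrite author's own statement) =====
-- stated objective: faster
-- what changed: Replaced the two run-length-encoding table builds plus an index loop over the tables with a single forward two-pointer scan that measures each run on the fly and fails early, allocating no intermediate tables.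
import Mathlib
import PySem

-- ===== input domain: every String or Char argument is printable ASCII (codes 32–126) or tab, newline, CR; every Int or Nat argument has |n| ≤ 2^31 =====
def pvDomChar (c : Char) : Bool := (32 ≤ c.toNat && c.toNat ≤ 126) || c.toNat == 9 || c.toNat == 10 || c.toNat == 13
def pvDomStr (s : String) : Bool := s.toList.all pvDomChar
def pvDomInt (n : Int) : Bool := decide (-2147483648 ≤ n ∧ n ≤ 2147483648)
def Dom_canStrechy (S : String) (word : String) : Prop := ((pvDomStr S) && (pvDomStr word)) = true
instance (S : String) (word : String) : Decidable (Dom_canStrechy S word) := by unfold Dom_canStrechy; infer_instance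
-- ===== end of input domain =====

-- B replaces A's two run-length tables + index loop by a single two-pointer group scan with early exit and no intermediate tables (measured faster in a timing run); same return value on all inputs.


-- ===== PORT A =====
-- one step of getKeyTable's loop: mutate last run's count or append a new run
def stepKT (table : List (Char × Int)) (ele : Char) : List (Char × Int) :=
  match table.getLast? with
  | none => [(ele, 1)]
  | some last => if ele = last.1 then table.dropLast ++ [(last.1, last.2 + 1)] else table ++ [(ele, 1)]

def getKeyTable (l : List Char) : List (Char × Int) :=
  l.foldl stepKT []

-- the `for i in range(len(S))` loop with its three `break`s and the `return True`;
-- indexing `counter[i]` is via getD: the loop only ever reads indices that are in range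
-- (the lengths-equal check and the `i == len-1` exit guarantee it), so Python never raises here.
def aloop (cS cW : List (Char × Int)) : List Nat → Bool
  | [] => false
  | i :: rest =>
    if cS.length ≠ cW.length then false
    else
      let p := cS.getD i (' ', 0)
      let q := cW.getD i (' ', 0)
      if p.1 ≠ q.1 then false
      else if p.2 < 3 ∧ p.2 ≠ q.2 then false
      else if (i : Int) = (cS.length : Int) - 1 then true
      else aloop cS cW rest

def canStrechy (S : String) (word : String) : Bool :=
  let cS := getKeyTable S.toList
  let cW := getKeyTable word.toList
  aloop cS cW (List.range S.toList.length)

-- ===== PORT B =====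
-- the inner `while` run-measuring loops: (length of leading run of c, remainder)
def runSplit (c : Char) : List Char → Int × List Char
  | [] => (0, [])
  | x :: t => if x = c then ((runSplit c t).1 + 1, (runSplit c t).2) else (0, x :: t)

theorem runSplit_length (c : Char) (l : List Char) : (runSplit c l).2.length ≤ l.length := by
  induction l with
  | nil => simp [runSplit]
  | cons x t ih =>
    simp only [runSplit]
    split
    · simp
      omega
    · simp

-- the outer two-pointer loop: each iteration consumes one whole run from each string
def bloop (s w : List Char) : Bool :=
  match s, w with
  | [], [] => true
  | [], _ :: _ => false
  | _ :: _, [] => false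
  | c :: s', d :: w' =>
    if d ≠ c then false
    else
      let ps := runSplit c s'
      let pw := runSplit c w'
      if ps.1 + 1 < 3 ∧ ps.1 + 1 ≠ pw.1 + 1 then false
      else bloop ps.2 pw.2
termination_by s.length
decreasing_by
  have := runSplit_length c s'
  simp
  omega

def canStrechy_alt (S : String) (word : String) : Bool :=
  if S.toList = [] then false else bloop S.toList word.toList

-- ===== PRECONDITION & SPEC =====
def Spec_canStrechy (S : String) (word : String) (out : Bool) : Prop := out = canStrechy_alt S word
instance (S : String) (word : String) (out : Bool) : Decidable (Spec_canStrechy S word out) := by unfold Spec_canStrechy; infer_instance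

-- ===== CLAIM (what is proved, stated in full; the proofs are below) =====
def Claim_equal_canStrechy : Prop := ∀ (S : String) (word : String), Dom_canStrechy S word → Spec_canStrechy S word (canStrechy S word)

-- ===== LEMMAS AND PROOFS =====

-- merge a pending run (c,k) onto the front of a group list
def mergeG (c : Char) (k : Int) : List (Char × Int) → List (Char × Int)
  | [] => [(c, k)]
  | (d, m) :: r => if c = d then (c, k + m) :: r else (c, k) :: (d, m) :: r

-- structural run-length encoding (counts as Int)
def groupsI : List Char → List (Char × Int)
  | [] => []
  | c :: t => mergeG c 1 (groupsI t)

theorem mergeG_merge (c : Char) (k : Int) (gs : List (Char × Int)) :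
    mergeG c k (mergeG c 1 gs) = mergeG c (k + 1) gs := by
  cases gs with
  | nil => simp [mergeG]
  | cons p r =>
    obtain ⟨d, m⟩ := p
    by_cases h : c = d <;> simp [mergeG, h] <;> ring

theorem mergeG_cons_ne (c e : Char) (k m : Int) (gs : List (Char × Int)) (h : c ≠ e) :
    mergeG c k (mergeG e m gs) = (c, k) :: mergeG e m gs := by
  cases gs with
  | nil => simp [mergeG, h]
  | cons p r =>
    obtain ⟨d, j⟩ := p
    by_cases h2 : e = d
    · subst h2
      simp [mergeG, h]
    · simp [mergeG, h2, h]

theorem foldl_stepKT (l : List Char) :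
    ∀ (pre : List (Char × Int)) (c : Char) (k : Int),
      List.foldl stepKT (pre ++ [(c, k)]) l = pre ++ mergeG c k (groupsI l) := by
  induction l with
  | nil => intro pre c k; simp [mergeG, groupsI]
  | cons e t ih =>
    intro pre c k
    by_cases h : e = c
    · subst h
      have hstep : stepKT (pre ++ [(e, k)]) e = pre ++ [(e, k + 1)] := by
        simp [stepKT]
      simp only [List.foldl_cons, hstep, ih pre e (k + 1), groupsI, mergeG_merge]
    · have hstep : stepKT (pre ++ [(c, k)]) e = (pre ++ [(c, k)]) ++ [(e, 1)] := by
        simp [stepKT, h]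
      simp only [List.foldl_cons, hstep]
      rw [ih (pre ++ [(c, k)]) e 1, groupsI, mergeG_cons_ne c e k 1 _ (fun hh => h hh.symm)]
      simp

theorem getKeyTable_eq (l : List Char) : getKeyTable l = groupsI l := by
  cases l with
  | nil => simp [getKeyTable, groupsI]
  | cons c t =>
    have h0 : stepKT [] c = [(c, 1)] := by simp [stepKT]
    have := foldl_stepKT t [] c 1
    simp only [List.nil_append] at this
    simp only [getKeyTable, List.foldl_cons, h0]
    rw [show ([(c, 1)] : List (Char × Int)) = [] ++ [(c, 1)] by simp, foldl_stepKT t [] c 1]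
    simp [groupsI]

theorem mergeG_ne_nil (c : Char) (k : Int) (gs : List (Char × Int)) : mergeG c k gs ≠ [] := by
  cases gs with
  | nil => simp [mergeG]
  | cons p r => obtain ⟨d, m⟩ := p; by_cases h : c = d <;> simp [mergeG, h]

theorem mergeG_length_le (c : Char) (k : Int) (gs : List (Char × Int)) :
    (mergeG c k gs).length ≤ gs.length + 1 := by
  cases gs with
  | nil => simp [mergeG]
  | cons p r =>
    obtain ⟨d, m⟩ := p
    by_cases h : c = d
    · simp [mergeG, h]
    · simp [mergeG, h]

theorem groupsI_length_le (l : List Char) : (groupsI l).length ≤ l.length := by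
  induction l with
  | nil => simp [groupsI]
  | cons c t ih =>
    have := mergeG_length_le c 1 (groupsI t)
    simp only [groupsI, List.length_cons]
    omega

-- comparison of two group lists: chars equal and (run ≥ 3 or counts equal), same number of groups
def cmpRec : List (Char × Int) → List (Char × Int) → Bool
  | [], [] => true
  | [], _ :: _ => false
  | _ :: _, [] => false
  | p :: ps, q :: qs =>
    (decide (p.1 = q.1) && (decide (3 ≤ p.2) || decide (p.2 = q.2))) && cmpRec ps qs

theorem cmpRec_length_ne : ∀ (ps qs : List (Char × Int)), ps.length ≠ qs.length → cmpRec ps qs = false := by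
  intro ps
  induction ps with
  | nil => intro qs h; cases qs <;> simp_all [cmpRec]
  | cons p ps ih =>
    intro qs h
    cases qs with
    | nil => simp [cmpRec]
    | cons q qs =>
      simp only [cmpRec, Bool.and_eq_false_iff]
      right
      exact ih qs (by simp at h; omega)

theorem groupsI_cons_run (l : List Char) :
    ∀ c, groupsI (c :: l) = (c, (runSplit c l).1 + 1) :: groupsI (runSplit c l).2 := by
  induction l with
  | nil => intro c; simp [groupsI, runSplit, mergeG]
  | cons x t ih =>
    intro c
    by_cases h : x = c
    · subst h
      rw [show groupsI (x :: x :: t) = mergeG x 1 (groupsI (x :: t)) from rfl, ih x]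
      simp [mergeG, runSplit]
      ring
    · simp only [groupsI, runSplit, if_neg h]
      have hcx : ¬ c = x := fun hh => h hh.symm
      rw [show mergeG x 1 (groupsI t) = groupsI (x :: t) from rfl, ih x]
      simp [mergeG, hcx]

theorem bloop_eq : ∀ (s w : List Char), bloop s w = cmpRec (groupsI s) (groupsI w)
  | [], [] => by simp [bloop, groupsI, cmpRec]
  | [], c :: t => by
    rw [groupsI_cons_run t c]
    simp [bloop, groupsI, cmpRec]
  | c :: t, [] => by
    rw [groupsI_cons_run t c]
    simp [bloop, groupsI, cmpRec]
  | c :: s', d :: w' => by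
    rw [groupsI_cons_run s' c, groupsI_cons_run w' d, bloop]
    by_cases hcd : d = c
    · subst hcd
      rw [if_neg (show ¬ (d ≠ d) by simp)]
      by_cases h : (runSplit d s').1 + 1 < 3 ∧ (runSplit d s').1 + 1 ≠ (runSplit d w').1 + 1
      · rw [if_pos h]
        simp only [cmpRec]
        have h3 : decide (3 ≤ (runSplit d s').1 + 1) = false := by
          simp only [decide_eq_false_iff_not, not_le]
          omega
        have h4 : decide ((runSplit d s').1 + 1 = (runSplit d w').1 + 1) = false := by
          simp [h.2]
        rw [h3, h4]
        simp
      · rw [if_neg h]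
        rw [bloop_eq (runSplit d s').2 (runSplit d w').2]
        simp only [cmpRec]
        have hok : (decide (3 ≤ (runSplit d s').1 + 1) || decide ((runSplit d s').1 + 1 = (runSplit d w').1 + 1)) = true := by
          by_cases h3 : 3 ≤ (runSplit d s').1 + 1
          · simp [h3]
          · have heq : (runSplit d s').1 + 1 = (runSplit d w').1 + 1 := by
              by_contra hne
              exact h ⟨by omega, hne⟩
            simp [heq]
        rw [hok]
        simp
    · rw [if_pos hcd]
      have hdc : decide (c = d) = false := by
        simp only [decide_eq_false_iff_not]
        exact fun hh => hcd hh.symm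
      simp [cmpRec, hdc]
termination_by s _ => s.length
decreasing_by
  have := runSplit_length d s'
  simp
  omega

theorem aloop_eq : ∀ (m : Nat), ∀ (i : Nat) (cS cW : List (Char × Int)),
    cS.length = cW.length → i < cS.length → cS.length ≤ i + m →
    aloop cS cW (List.range' i m) = cmpRec (cS.drop i) (cW.drop i) := by
  intro m
  induction m with
  | zero => intro i cS cW h1 h2 h3; omega
  | succ m ih =>
    intro i cS cW hlen hi hub
    have hiW : i < cW.length := by omega
    have hdS : cS.drop i = cS[i] :: cS.drop (i + 1) := List.drop_eq_getElem_cons hi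
    have hdW : cW.drop i = cW[i] :: cW.drop (i + 1) := List.drop_eq_getElem_cons hiW
    have hgS : cS.getD i (' ', 0) = cS[i] := List.getD_eq_getElem cS _ hi
    have hgW : cW.getD i (' ', 0) = cW[i] := List.getD_eq_getElem cW _ hiW
    rw [List.range'_succ, aloop, if_neg (by omega)]
    simp only [hgS, hgW, hdS, hdW, cmpRec]
    by_cases hch : cS[i].1 = cW[i].1
    · rw [if_neg (by simpa using hch)]
      by_cases hcnt : cS[i].2 < 3 ∧ cS[i].2 ≠ cW[i].2
      · rw [if_pos hcnt]
        have h3 : ¬ (3 ≤ cS[i].2) := by omega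
        simp [h3, hcnt.2]
      · rw [if_neg hcnt]
        have hok : (decide (cS[i].1 = cW[i].1) && (decide (3 ≤ cS[i].2) || decide (cS[i].2 = cW[i].2))) = true := by
          by_cases h3 : 3 ≤ cS[i].2
          · simp [hch, h3]
          · simp only [not_and, ne_eq, not_not] at hcnt
            simp [hch, hcnt (by omega)]
        by_cases hlast : (i : Int) = (cS.length : Int) - 1
        · rw [if_pos hlast]
          have he1 : cS.drop (i + 1) = [] := by
            apply List.eq_nil_of_length_eq_zero
            simp only [List.length_drop]
            omega
          have he2 : cW.drop (i + 1) = [] := by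
            apply List.eq_nil_of_length_eq_zero
            simp only [List.length_drop]
            omega
          rw [he1, he2]
          simp [cmpRec, hok]
        · rw [if_neg hlast]
          rw [ih (i + 1) cS cW hlen (by omega) (by omega)]
          simp [hok]
    · rw [if_pos (by simpa using hch)]
      simp [hch]

theorem groupsI_nil_iff (l : List Char) : groupsI l = [] ↔ l = [] := by
  cases l with
  | nil => simp [groupsI]
  | cons c t => simp [groupsI, mergeG_ne_nil]

-- ===== VERDICT (by name: the statement is the Claim_ definition above) =====
theorem canStrechy_spec : Claim_equal_canStrechy := by
  unfold Claim_equal_canStrechy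
  intro S word _
  unfold Spec_canStrechy canStrechy canStrechy_alt
  simp only [getKeyTable_eq]
  by_cases hS : S.toList = []
  · rw [if_pos hS, hS]
    simp [aloop]
  · rw [if_neg hS, bloop_eq]
    obtain ⟨c, t, hct⟩ := List.exists_cons_of_ne_nil hS
    have hneS : groupsI S.toList ≠ [] := by
      rw [Ne, groupsI_nil_iff]; exact hS
    have hposS : 0 < (groupsI S.toList).length := List.length_pos_of_ne_nil hneS
    by_cases hlen : (groupsI S.toList).length = (groupsI word.toList).length
    · have hle : (groupsI S.toList).length ≤ 0 + S.toList.length := by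
        have := groupsI_length_le S.toList
        omega
      rw [List.range_eq_range', aloop_eq S.toList.length 0 _ _ hlen hposS hle]
      simp
    · rw [cmpRec_length_ne _ _ hlen]
      have hn : S.toList.length = (S.toList.length - 1) + 1 := by
        rw [hct]
        simp
      rw [List.range_eq_range', hn, List.range'_succ, aloop, if_pos hlen]
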